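-- pv_equiv track=rewrite | github.com/Devang-25/Google-Kickstart-CodeJam-2018-2019 | 2019_A_2/functions.py | grid_to_distances
-- ===== SOURCE A (Python) =====
-- from collections import deque
--
-- def neighbours(a,b,R,C):
--     neighbours=[]
--     if(a>0):
--         neighbours.append((a-1,b))
--     if(a<R-1):
--         neighbours.append((a+1,b))
--     if(b>0):
--         neighbours.append((a,b-1))
--     if(b<C-1):
--         neighbours.append((a,b+1))
--     return(neighbours)
--
-- def grid_to_distances(grid,R,C):
--
--     distance,nodes = [[-1 for j in range(C)]for i in range(R)],[]
--
--     i=0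
--     for row in grid:
--         j=0
--         for value in row:
--             if value :
--                 nodes.append((i,j))
--                 distance[i][j]=0
--             j+=1
--         i+=1
--
--     queue=deque(nodes)
--     visited=set(nodes)
--
--     while(queue):
--         a,b = queue.popleft()
--         neighboursList=neighbours(a,b,R,C)
--         currentDistance = distance[a][b]
--
--         for n in neighboursList:
--             if(not n in visited):
--                 visited.add(n)
--                 queue.append(n)
--                 na,nb=n
--                 distance[na][nb]=currentDistance+1
--
--     return(distance)
-- ===== SOURCE B (Python) =====
-- def grid_to_distances(grid, R, C):
--     sources = [(i, j) for i, row in enumerate(grid) for j, v in enumerate(row) if v]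
--     result = []
--     for i in range(R):
--         out_row = []
--         for j in range(C):
--             best = -1
--             for a, b in sources:
--                 d = abs(i - a) + abs(j - b)
--                 if best < 0 or d < best:
--                     best = d
--             out_row.append(best)
--         result.append(out_row)
--     return result
-- ===== Notes on version B (the rewrite author's own statement) =====
-- stated objective: simpler
-- what changed: Replaces the multi-source BFS (deque + visited set + neighbour expansion) by a direct per-cell minimum of Manhattan distances over the row-major list of true cells, valid because the grid has no obstacles.
import Mathlib
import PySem

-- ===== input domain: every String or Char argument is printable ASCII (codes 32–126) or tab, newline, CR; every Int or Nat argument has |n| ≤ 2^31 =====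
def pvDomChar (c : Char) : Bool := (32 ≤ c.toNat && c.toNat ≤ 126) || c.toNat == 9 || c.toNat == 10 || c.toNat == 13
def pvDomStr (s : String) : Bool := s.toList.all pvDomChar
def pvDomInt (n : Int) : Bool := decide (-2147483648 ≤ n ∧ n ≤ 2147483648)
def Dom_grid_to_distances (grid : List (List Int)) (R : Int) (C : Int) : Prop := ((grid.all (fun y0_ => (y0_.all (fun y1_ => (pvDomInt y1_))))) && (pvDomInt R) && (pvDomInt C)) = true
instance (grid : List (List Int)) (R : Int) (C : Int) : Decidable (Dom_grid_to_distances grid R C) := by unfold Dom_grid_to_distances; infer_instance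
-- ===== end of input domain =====

-- B replaces A's multi-source BFS (deque + visited set) by a direct per-cell minimum of
-- Manhattan distances to the true cells — valid because the grid has no obstacles (objective: simpler).

-- ===== PORT A =====
-- distance[a][b] (indices are the loop counters / BFS cells, always ≥ 0 and in range inside Pre_)
def get2 (d : List (List Int)) (a b : Int) : Int := (d.getD a.toNat []).getD b.toNat (-1)
-- distance[a][b] = v
def set2 (d : List (List Int)) (a b : Int) (v : Int) : List (List Int) :=
  d.set a.toNat ((d.getD a.toNat []).set b.toNat v)

def neighbours (a b R C : Int) : List (Int × Int) :=
  let ns : List (Int × Int) := []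
  let ns := if a > 0 then ns ++ [(a - 1, b)] else ns
  let ns := if a < R - 1 then ns ++ [(a + 1, b)] else ns
  let ns := if b > 0 then ns ++ [(a, b - 1)] else ns
  let ns := if b < C - 1 then ns ++ [(a, b + 1)] else ns
  ns

-- body of 'for value in row' (j is t.2)
def scanCell (i : Int) (t : (List (List Int) × List (Int × Int)) × Int) (value : Int) :
    (List (List Int) × List (Int × Int)) × Int :=
  ((if value ≠ 0 then (set2 t.1.1 i t.2 0, t.1.2 ++ [(i, t.2)]) else t.1), t.2 + 1)

-- body of 'for row in grid' (i is acc.2)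
def scanRow (acc : (List (List Int) × List (Int × Int)) × Int) (row : List Int) :
    (List (List Int) × List (Int × Int)) × Int :=
  ((row.foldl (scanCell acc.2) (acc.1, 0)).1, acc.2 + 1)

-- body of 'for n in neighboursList'
def bfsStep (cur : Int) (st : List (List Int) × List (Int × Int) × PySem.Set (Int × Int))
    (n : Int × Int) : List (List Int) × List (Int × Int) × PySem.Set (Int × Int) :=
  if PySem.Set.contains st.2.2 n then st
  else (set2 st.1 n.1 n.2 (cur + 1), st.2.1 ++ [n], PySem.Set.add st.2.2 n)

-- 'while(queue)'; the fuel R*C+1 provably exceeds the number of pops inside Pre_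
def bfsLoop : Nat → List (List Int) → List (Int × Int) → PySem.Set (Int × Int) → Int → Int →
    List (List Int)
  | 0, dist, _, _, _, _ => dist
  | fuel + 1, dist, queue, visited, R, C =>
    match queue with
    | [] => dist
    | (a, b) :: rest =>
      let st := (neighbours a b R C).foldl (bfsStep (get2 dist a b)) (dist, rest, visited)
      bfsLoop fuel st.1 st.2.1 st.2.2 R C

def grid_to_distances (grid : List (List Int)) (R : Int) (C : Int) : List (List Int) :=
  let distance := (PySem.List.pyRange 0 R 1).map
    (fun _ => (PySem.List.pyRange 0 C 1).map (fun _ => (-1 : Int)))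
  let s := grid.foldl scanRow ((distance, []), 0)
  let nodes := s.1.2
  bfsLoop (R.toNat * C.toNat + 1) s.1.1 nodes (PySem.Set.ofList nodes) R C

-- ===== PORT B =====
-- running minimum: 'if best < 0 or d < best: best = d'
def bestStep (c : Int × Int) (best : Int) (s : Int × Int) : Int :=
  let d := |c.1 - s.1| + |c.2 - s.2|
  if best < 0 ∨ d < best then d else best

def grid_to_distances_alt (grid : List (List Int)) (R : Int) (C : Int) : List (List Int) :=
  let sources := (PySem.List.enumerate grid 0).flatMap (fun p =>
    (PySem.List.enumerate p.2 0).filterMap (fun q =>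
      if q.2 ≠ 0 then some (p.1, q.1) else none))
  (PySem.List.pyRange 0 R 1).map (fun i =>
    (PySem.List.pyRange 0 C 1).map (fun j =>
      sources.foldl (bestStep (i, j)) (-1)))

-- ===== PRECONDITION & SPEC =====
-- Pre_ excludes exactly the inputs where A raises IndexError: a true cell at row i ≥ R or column j ≥ C.
def Pre_grid_to_distances (grid : List (List Int)) (R : Int) (C : Int) : Prop :=
  ∀ p ∈ PySem.List.enumerate grid 0, ∀ q ∈ PySem.List.enumerate p.2 0,
    q.2 ≠ 0 → p.1 < R ∧ q.1 < C
instance (grid : List (List Int)) (R : Int) (C : Int) :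
    Decidable (Pre_grid_to_distances grid R C) := by unfold Pre_grid_to_distances; infer_instance

def pvWitness_grid_to_distances : List (List Int) × Int × Int := ([[0, 1], [1, 0]], 2, 2)

def Spec_grid_to_distances (grid : List (List Int)) (R : Int) (C : Int) (out : List (List Int)) :
    Prop := out = grid_to_distances_alt grid R C
instance (grid : List (List Int)) (R : Int) (C : Int) (out : List (List Int)) :
    Decidable (Spec_grid_to_distances grid R C out) := by unfold Spec_grid_to_distances; infer_instance

-- ===== CLAIM (what is proved, stated in full; the proofs are below) =====
def Claim_equal_grid_to_distances : Prop := ∀ (grid : List (List Int)) (R : Int) (C : Int), Dom_grid_to_distances grid R C → Pre_grid_to_distances grid R C → Spec_grid_to_distances grid R C (grid_to_distances grid R C)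

-- ===== LEMMAS AND PROOFS =====

-- in-bounds cells, Manhattan distance, the row-major source list, its nearest-distance fold
def inb (R C : Int) (c : Int × Int) : Prop := 0 ≤ c.1 ∧ c.1 < R ∧ 0 ≤ c.2 ∧ c.2 < C

def man (u v : Int × Int) : Int :=
  ((u.1 - v.1).natAbs : Int) + ((u.2 - v.2).natAbs : Int)

def srcs (grid : List (List Int)) : List (Int × Int) :=
  (PySem.List.enumerate grid 0).flatMap (fun p =>
    (PySem.List.enumerate p.2 0).filterMap (fun q =>
      if q.2 ≠ 0 then some (p.1, q.1) else none))

def lab (d : List (List Int)) (c : Int × Int) : Int := get2 d c.1 c.2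

def Shape (R C : Int) (d : List (List Int)) : Prop :=
  d.length = R.toNat ∧ ∀ row ∈ d, row.length = C.toNat

def boxL (R C : Int) : List (Int × Int) :=
  (PySem.List.pyRange 0 R 1).flatMap (fun i =>
    (PySem.List.pyRange 0 C 1).map (fun j => (i, j)))

structure BfsInv (S : List (Int × Int)) (R C : Int) (dist : List (List Int))
    (queue vis : List (Int × Int)) : Prop where
  shape : Shape R C dist
  visInb : ∀ c ∈ vis, inb R C c
  visNodup : vis.Nodup
  visIff : ∀ c, inb R C c → (c ∈ vis ↔ lab dist c ≠ -1)
  sound : ∀ c ∈ vis, 0 ≤ lab dist c ∧ ∃ s ∈ S, man s c ≤ lab dist c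
  src0 : ∀ s ∈ S, s ∈ vis ∧ lab dist s = 0
  qSub : queue ⊆ vis
  qNodup : queue.Nodup
  qMono : queue.Pairwise (fun x y => lab dist x ≤ lab dist y)
  qBound : ∀ hd t, queue = hd :: t → ∀ x ∈ queue, lab dist x ≤ lab dist hd + 1
  popped : ∀ u ∈ vis, u ∉ queue →
    (∀ v, inb R C v → man u v = 1 → v ∈ vis ∧ lab dist v ≤ lab dist u + 1) ∧
    (∀ x ∈ queue, lab dist u ≤ lab dist x)


def mdist (S : List (Int × Int)) (c : Int × Int) : Int := S.foldl (bestStep c) (-1)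

lemma bestStep_eq (c : Int × Int) (best : Int) (s : Int × Int) :
    bestStep c best s = if best < 0 ∨ man c s < best then man c s else best := by
  simp only [bestStep, man, Int.abs_eq_natAbs]

lemma man_nonneg (u v : Int × Int) : 0 ≤ man u v := by unfold man; omega

lemma man_comm (u v : Int × Int) : man u v = man v u := by unfold man; omega

lemma man_self (u : Int × Int) : man u u = 0 := by unfold man; omega

lemma man_triangle (u v w : Int × Int) : man u w ≤ man u v + man v w := by unfold man; omega

lemma man_eq_zero {u v : Int × Int} (h : man u v = 0) : u = v := by
  unfold man at h
  have h1 : u.1 = v.1 := by omega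
  have h2 : u.2 = v.2 := by omega
  exact Prod.ext h1 h2

lemma foldl_best_spec (c : Int × Int) :
    ∀ (S : List (Int × Int)) (acc : Int), 0 ≤ acc →
      0 ≤ S.foldl (bestStep c) acc ∧ S.foldl (bestStep c) acc ≤ acc ∧
      (∀ s ∈ S, S.foldl (bestStep c) acc ≤ man c s) ∧
      (S.foldl (bestStep c) acc = acc ∨ ∃ s ∈ S, S.foldl (bestStep c) acc = man c s) := by
  intro S
  induction S with
  | nil => intro acc hacc; simpa using hacc
  | cons s t ih =>
    intro acc hacc
    rw [List.foldl_cons, bestStep_eq]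
    split_ifs with h
    · obtain ⟨r0, r1, r2, r3⟩ := ih (man c s) (man_nonneg c s)
      refine ⟨r0, by omega, ?_, ?_⟩
      · intro s' hs'
        rcases List.mem_cons.mp hs' with h' | h'
        · subst h'; omega
        · exact r2 s' h'
      · rcases r3 with h' | ⟨s', hs', h'⟩
        · exact Or.inr ⟨s, List.mem_cons_self .., h'⟩
        · exact Or.inr ⟨s', List.mem_cons_of_mem _ hs', h'⟩
    · obtain ⟨r0, r1, r2, r3⟩ := ih acc hacc
      refine ⟨r0, r1, ?_, ?_⟩
      · intro s' hs'
        rcases List.mem_cons.mp hs' with h' | h'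
        · subst h'; omega
        · exact r2 s' h'
      · rcases r3 with h' | ⟨s', hs', h'⟩
        · exact Or.inl h'
        · exact Or.inr ⟨s', List.mem_cons_of_mem _ hs', h'⟩

lemma mdist_spec (S : List (Int × Int)) (c : Int × Int) (hne : S ≠ []) :
    0 ≤ mdist S c ∧ (∀ s ∈ S, mdist S c ≤ man c s) ∧ ∃ s ∈ S, mdist S c = man c s := by
  match S with
  | s :: t =>
    unfold mdist
    rw [List.foldl_cons, bestStep_eq, if_pos (Or.inl (by omega))]
    obtain ⟨r0, r1, r2, r3⟩ := foldl_best_spec c t (man c s) (man_nonneg c s)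
    refine ⟨r0, ?_, ?_⟩
    · intro s' hs'
      rcases List.mem_cons.mp hs' with h' | h'
      · subst h'; omega
      · exact r2 s' h'
    · rcases r3 with h' | ⟨s', hs', h'⟩
      · exact ⟨s, List.mem_cons_self .., h'⟩
      · exact ⟨s', List.mem_cons_of_mem _ hs', h'⟩

lemma shape_set2 {R C : Int} {d : List (List Int)} (hsh : Shape R C d) (a b v : Int) :
    Shape R C (set2 d a b v) := by
  obtain ⟨h1, h2⟩ := hsh
  by_cases hl : a.toNat < d.length
  · refine ⟨by simpa [set2], ?_⟩
    intro row hrow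
    rcases List.mem_or_eq_of_mem_set hrow with h | h
    · exact h2 row h
    · subst h
      rw [List.length_set, List.getD_eq_getElem _ _ hl]
      exact h2 _ (List.getElem_mem _)
  · unfold set2
    rw [List.set_eq_of_length_le (by omega)]
    exact ⟨h1, h2⟩

lemma lab_set2 {R C : Int} {d : List (List Int)} (hsh : Shape R C d) {w c : Int × Int}
    (hw : inb R C w) (hc : inb R C c) (v : Int) :
    lab (set2 d w.1 w.2 v) c = if c = w then v else lab d c := by
  obtain ⟨hd, hrows⟩ := hsh
  obtain ⟨hw1, hw2, hw3, hw4⟩ := hw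
  obtain ⟨hc1, hc2, hc3, hc4⟩ := hc
  have hwl : w.1.toNat < d.length := by omega
  have hcl : c.1.toNat < d.length := by omega
  have hcrow : (d.getD c.1.toNat []).length = C.toNat := by
    rw [List.getD_eq_getElem _ _ hcl]; exact hrows _ (List.getElem_mem _)
  unfold lab get2 set2
  rw [List.getD_eq_getElem _ [] (n := c.1.toNat) (by simpa using hcl), List.getElem_set]
  by_cases h1 : w.1.toNat = c.1.toNat
  · rw [if_pos h1, h1]
    rw [List.getD_eq_getElem _ (-1) (n := c.2.toNat) (by rw [List.length_set]; omega),
        List.getElem_set]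
    by_cases h2 : w.2.toNat = c.2.toNat
    · rw [if_pos h2, if_pos (Prod.ext (by omega) (by omega) : c = w)]
    · rw [if_neg h2, if_neg (show ¬ c = w by intro h; subst h; omega)]
      rw [List.getD_eq_getElem _ (-1) (n := c.2.toNat) (by omega)]
  · rw [if_neg h1, if_neg (show ¬ c = w by intro h; subst h; omega)]
    rw [List.getD_eq_getElem d [] (n := c.1.toNat) hcl]


def rowSrcs (i : Int) (row : List Int) (j0 : Int) : List (Int × Int) :=
  (PySem.List.enumerate row j0).filterMap (fun q => if q.2 ≠ 0 then some (i, q.1) else none)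

def srcsFrom (rows : List (List Int)) (s : Int) : List (Int × Int) :=
  (PySem.List.enumerate rows s).flatMap (fun p => rowSrcs p.1 p.2 0)

lemma srcs_eq (grid : List (List Int)) : srcs grid = srcsFrom grid 0 := rfl

lemma rowSrcs_nil (i j0 : Int) : rowSrcs i [] j0 = [] := rfl

lemma rowSrcs_cons (i v : Int) (row : List Int) (j0 : Int) :
    rowSrcs i (v :: row) j0 = (if v ≠ 0 then [(i, j0)] else []) ++ rowSrcs i row (j0 + 1) := by
  unfold rowSrcs
  rw [PySem.List.enumerate_cons, List.filterMap_cons]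
  split_ifs with h <;> simp

lemma mem_rowSrcs {i : Int} {row : List Int} {j0 : Int} {c : Int × Int} :
    c ∈ rowSrcs i row j0 ↔
      ∃ (j : Nat) (_ : j < row.length), row[j] ≠ 0 ∧ c = (i, j0 + j) := by
  unfold rowSrcs
  rw [List.mem_filterMap]
  constructor
  · rintro ⟨q, hq, hc⟩
    rw [PySem.List.mem_enumerate_iff] at hq
    obtain ⟨k, hk, rfl⟩ := hq
    dsimp at hc
    split_ifs at hc with h
    · exact ⟨k, hk, h, (Option.some_inj.mp hc).symm⟩
  · rintro ⟨j, hj, hne, rfl⟩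
    exact ⟨(j0 + j, row[j]), PySem.List.mem_enumerate_iff _ _ _ |>.mpr ⟨j, hj, rfl⟩,
      by simp [hne]⟩

lemma nodup_rowSrcs (i : Int) (row : List Int) : ∀ j0, (rowSrcs i row j0).Nodup := by
  induction row with
  | nil => intro j0; simp [rowSrcs_nil]
  | cons v t ih =>
    intro j0
    rw [rowSrcs_cons, List.nodup_append]
    refine ⟨by split_ifs <;> simp, ih _, ?_⟩
    intro a ha b hb
    have ha' : a = (i, j0) := by
      split_ifs at ha with h
      · simpa using ha
      · simp at ha
    obtain ⟨j, hj, hne, rfl⟩ := mem_rowSrcs.mp hb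
    subst ha'
    intro h
    have := congrArg Prod.snd h
    simp at this
    omega

lemma srcsFrom_nil (s : Int) : srcsFrom [] s = [] := rfl

lemma srcsFrom_cons (r : List Int) (rows : List (List Int)) (s : Int) :
    srcsFrom (r :: rows) s = rowSrcs s r 0 ++ srcsFrom rows (s + 1) := by
  unfold srcsFrom
  rw [PySem.List.enumerate_cons, List.flatMap_cons]

lemma mem_srcsFrom {rows : List (List Int)} {s : Int} {c : Int × Int} :
    c ∈ srcsFrom rows s ↔
      ∃ (k : Nat) (_ : k < rows.length) (j : Nat) (_ : j < rows[k].length),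
        rows[k][j] ≠ 0 ∧ c = (s + (k : Int), (j : Int)) := by
  unfold srcsFrom
  rw [List.mem_flatMap]
  constructor
  · rintro ⟨p, hp, hc⟩
    rw [PySem.List.mem_enumerate_iff] at hp
    obtain ⟨k, hk, rfl⟩ := hp
    rw [mem_rowSrcs] at hc
    obtain ⟨j, hj, hne, rfl⟩ := hc
    exact ⟨k, hk, j, hj, hne, by simp⟩
  · rintro ⟨k, hk, j, hj, hne, rfl⟩
    refine ⟨(s + k, rows[k]), PySem.List.mem_enumerate_iff _ _ _ |>.mpr ⟨k, hk, rfl⟩, ?_⟩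
    rw [mem_rowSrcs]
    exact ⟨j, hj, hne, by simp⟩

lemma nodup_srcsFrom (rows : List (List Int)) : ∀ s, (srcsFrom rows s).Nodup := by
  induction rows with
  | nil => intro s; simp [srcsFrom_nil]
  | cons r t ih =>
    intro s
    rw [srcsFrom_cons, List.nodup_append]
    refine ⟨nodup_rowSrcs _ _ _, ih _, ?_⟩
    intro a ha b hb
    obtain ⟨j, hj, hne, rfl⟩ := mem_rowSrcs.mp ha
    obtain ⟨k, hk, j2, hj2, hne2, rfl⟩ := mem_srcsFrom.mp hb
    intro h
    have := congrArg Prod.fst h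
    simp at this
    omega

lemma shape_dist0 (R C : Int) :
    Shape R C ((PySem.List.pyRange 0 R 1).map
      (fun _ => (PySem.List.pyRange 0 C 1).map (fun _ => (-1 : Int)))) := by
  constructor
  · rw [List.length_map, PySem.List.length_pyRange_one]; norm_num
  · intro row hrow
    rw [List.mem_map] at hrow
    obtain ⟨_, _, rfl⟩ := hrow
    rw [List.length_map, PySem.List.length_pyRange_one]; norm_num

lemma lab_dist0 (R C : Int) (c : Int × Int) :
    lab ((PySem.List.pyRange 0 R 1).map
      (fun _ => (PySem.List.pyRange 0 C 1).map (fun _ => (-1 : Int)))) c = -1 := by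
  unfold lab get2
  by_cases h1 : c.1.toNat < ((PySem.List.pyRange 0 R 1).map
      (fun _ => (PySem.List.pyRange 0 C 1).map (fun _ => (-1 : Int)))).length
  · rw [List.getD_eq_getElem _ [] h1, List.getElem_map]
    by_cases h2 : c.2.toNat < ((PySem.List.pyRange 0 C 1).map (fun _ => (-1 : Int))).length
    · rw [List.getD_eq_getElem _ (-1) h2, List.getElem_map]
    · rw [List.getD_eq_default _ (-1) (by omega)]
  · rw [List.getD_eq_default _ [] (by omega)]
    rw [List.getD_eq_default _ (-1) (by simp)]

lemma scanRow_fold_spec {R C : Int} (row : List Int) :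
    ∀ (i j0 : Int) (d : List (List Int)) (ns : List (Int × Int)),
      Shape R C d → (∀ c ∈ rowSrcs i row j0, inb R C c) →
      Shape R C (row.foldl (scanCell i) ((d, ns), j0)).1.1 ∧
      (row.foldl (scanCell i) ((d, ns), j0)).1.2 = ns ++ rowSrcs i row j0 ∧
      (∀ c, inb R C c → lab (row.foldl (scanCell i) ((d, ns), j0)).1.1 c =
        if c ∈ rowSrcs i row j0 then 0 else lab d c) := by
  induction row with
  | nil =>
    intro i j0 d ns hsh _
    refine ⟨hsh, by simp [rowSrcs_nil], ?_⟩
    intro c hc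
    simp [rowSrcs_nil]
  | cons v t ih =>
    intro i j0 d ns hsh hinb
    rw [List.foldl_cons]
    by_cases hv : v ≠ 0
    · have hstep : scanCell i ((d, ns), j0) v =
          ((set2 d i j0 0, ns ++ [(i, j0)]), j0 + 1) := by
        simp [scanCell, hv]
      rw [hstep]
      have hmem : (i, j0) ∈ rowSrcs i (v :: t) j0 := by
        rw [rowSrcs_cons, if_pos hv]; simp
      have hinb0 : inb R C (i, j0) := hinb _ hmem
      have hsh1 : Shape R C (set2 d i j0 0) := shape_set2 hsh i j0 0
      have hinb1 : ∀ c ∈ rowSrcs i t (j0 + 1), inb R C c := by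
        intro c hc
        apply hinb
        rw [rowSrcs_cons, if_pos hv]
        simpa using Or.inr hc
      obtain ⟨r1, r2, r3⟩ := ih i (j0 + 1) (set2 d i j0 0) (ns ++ [(i, j0)]) hsh1 hinb1
      refine ⟨r1, ?_, ?_⟩
      · rw [r2, rowSrcs_cons, if_pos hv]
        simp
      · intro c hc
        rw [r3 c hc]
        have hlab : lab (set2 d i j0 0) c = if c = (i, j0) then 0 else lab d c :=
          lab_set2 hsh hinb0 hc 0
        rw [hlab, rowSrcs_cons, if_pos hv]
        by_cases h1 : c ∈ rowSrcs i t (j0 + 1)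
        · rw [if_pos h1, if_pos (by simpa using Or.inr h1)]
        · rw [if_neg h1]
          by_cases h2 : c = (i, j0)
          · rw [if_pos h2, if_pos (by simp [h2])]
          · rw [if_neg h2, if_neg (by simp [h1, h2])]
    · have hstep : scanCell i ((d, ns), j0) v = ((d, ns), j0 + 1) := by
        simp [scanCell, hv]
      rw [hstep]
      have hZ : rowSrcs i (v :: t) j0 = rowSrcs i t (j0 + 1) := by
        rw [rowSrcs_cons, if_neg hv]; simp
      have hinb1 : ∀ c ∈ rowSrcs i t (j0 + 1), inb R C c := by
        intro c hc; apply hinb; rw [hZ]; exact hc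
      obtain ⟨r1, r2, r3⟩ := ih i (j0 + 1) d ns hsh hinb1
      exact ⟨r1, by rw [r2, hZ], by intro c hc; rw [r3 c hc, hZ]⟩

lemma scan_fold_spec {R C : Int} (rows : List (List Int)) :
    ∀ (i0 : Int) (d : List (List Int)) (ns : List (Int × Int)),
      Shape R C d → (∀ c ∈ srcsFrom rows i0, inb R C c) →
      Shape R C (rows.foldl scanRow ((d, ns), i0)).1.1 ∧
      (rows.foldl scanRow ((d, ns), i0)).1.2 = ns ++ srcsFrom rows i0 ∧
      (∀ c, inb R C c → lab (rows.foldl scanRow ((d, ns), i0)).1.1 c =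
        if c ∈ srcsFrom rows i0 then 0 else lab d c) := by
  induction rows with
  | nil =>
    intro i0 d ns hsh _
    exact ⟨hsh, by simp [srcsFrom_nil], by intro c hc; simp [srcsFrom_nil]⟩
  | cons r t ih =>
    intro i0 d ns hsh hinb
    rw [List.foldl_cons]
    have hinb0 : ∀ c ∈ rowSrcs i0 r 0, inb R C c := by
      intro c hc; apply hinb; rw [srcsFrom_cons]; exact List.mem_append_left _ hc
    obtain ⟨s1, s2, s3⟩ := scanRow_fold_spec r i0 0 d ns hsh hinb0
    have hstep : scanRow ((d, ns), i0) r = ((r.foldl (scanCell i0) ((d, ns), 0)).1, i0 + 1) := rfl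
    rw [hstep]
    have hinb1 : ∀ c ∈ srcsFrom t (i0 + 1), inb R C c := by
      intro c hc; apply hinb; rw [srcsFrom_cons]; exact List.mem_append_right _ hc
    have hpair : (r.foldl (scanCell i0) ((d, ns), 0)).1 =
        ((r.foldl (scanCell i0) ((d, ns), 0)).1.1, (r.foldl (scanCell i0) ((d, ns), 0)).1.2) := rfl
    rw [hpair, s2]
    obtain ⟨r1, r2, r3⟩ := ih (i0 + 1) _ _ s1 hinb1
    refine ⟨r1, ?_, ?_⟩
    · rw [r2, srcsFrom_cons]
      simp
    · intro c hc
      rw [r3 c hc, s3 c hc, srcsFrom_cons]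
      by_cases h1 : c ∈ srcsFrom t (i0 + 1)
      · rw [if_pos h1, if_pos (List.mem_append_right _ h1)]
      · rw [if_neg h1]
        by_cases h2 : c ∈ rowSrcs i0 r 0
        · rw [if_pos h2, if_pos (List.mem_append_left _ h2)]
        · rw [if_neg h2, if_neg (by simp [h1, h2])]


lemma mem_neighbours {R C a b : Int} (h1 : 0 ≤ a) (h2 : a < R) (h3 : 0 ≤ b) (h4 : b < C)
    (n : Int × Int) :
    n ∈ neighbours a b R C ↔ (inb R C n ∧ man n (a, b) = 1) := by
  obtain ⟨n1, n2⟩ := n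
  unfold neighbours inb man
  split_ifs <;>
    simp only [List.nil_append, List.cons_append, List.mem_append, List.mem_singleton,
      List.mem_cons, List.not_mem_nil, Prod.mk.injEq, false_or, or_false, iff_false,
      false_iff] <;>
    omega

lemma bfsFold_spec {R C : Int} (cur : Int) :
    ∀ (ns : List (Int × Int)), (∀ n ∈ ns, inb R C n) →
    ∀ (dist : List (List Int)) (q vis : List (Int × Int)),
      Shape R C dist → (∀ c ∈ vis, inb R C c) →
      ∃ added : List (Int × Int),
        (ns.foldl (bfsStep cur) (dist, q, vis)).2.2 = vis ++ added ∧
        (ns.foldl (bfsStep cur) (dist, q, vis)).2.1 = q ++ added ∧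
        Shape R C (ns.foldl (bfsStep cur) (dist, q, vis)).1 ∧
        added.Nodup ∧
        (∀ n ∈ added, inb R C n ∧ n ∈ ns ∧ n ∉ vis) ∧
        (∀ c, inb R C c → lab (ns.foldl (bfsStep cur) (dist, q, vis)).1 c =
          if c ∈ added then cur + 1 else lab dist c) ∧
        (∀ n ∈ ns, n ∈ vis ++ added) := by
  intro ns
  induction ns with
  | nil =>
    intro _ dist q vis hsh hvis
    exact ⟨[], by simp, by simp, hsh, List.nodup_nil, by simp, by intro c hc; simp, by simp⟩
  | cons n t ih =>
    intro hns dist q vis hsh hvis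
    rw [List.foldl_cons]
    by_cases hmem : n ∈ vis
    · have hstep : bfsStep cur (dist, q, vis) n = (dist, q, vis) := by
        unfold bfsStep
        rw [if_pos (by simpa [PySem.Set.contains_iff] using hmem)]
      rw [hstep]
      obtain ⟨added, a1, a2, a3, a4, a5, a6, a7⟩ :=
        ih (fun m hm => hns m (List.mem_cons_of_mem _ hm)) dist q vis hsh hvis
      refine ⟨added, a1, a2, a3, a4,
        fun m hm => ⟨(a5 m hm).1, List.mem_cons_of_mem _ (a5 m hm).2.1, (a5 m hm).2.2⟩, a6, ?_⟩
      intro m hm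
      rcases List.mem_cons.mp hm with h | h
      · subst h; exact List.mem_append_left _ hmem
      · exact a7 m h
    · have hstep : bfsStep cur (dist, q, vis) n =
          (set2 dist n.1 n.2 (cur + 1), q ++ [n], vis ++ [n]) := by
        unfold bfsStep
        rw [if_neg (by simpa [PySem.Set.contains_iff] using hmem)]
        rw [PySem.Set.add_of_not_mem hmem]
      rw [hstep]
      have hinbn : inb R C n := hns n (List.mem_cons_self ..)
      have hsh1 : Shape R C (set2 dist n.1 n.2 (cur + 1)) := shape_set2 hsh _ _ _
      have hvis1 : ∀ c ∈ vis ++ [n], inb R C c := by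
        intro c hc
        rcases List.mem_append.mp hc with h | h
        · exact hvis c h
        · rw [List.mem_singleton] at h; subst h; exact hinbn
      obtain ⟨added, a1, a2, a3, a4, a5, a6, a7⟩ :=
        ih (fun m hm => hns m (List.mem_cons_of_mem _ hm)) _ _ _ hsh1 hvis1
      have hnadd : n ∉ added := by
        intro hin
        exact (a5 n hin).2.2 (List.mem_append_right _ (by simp))
      refine ⟨n :: added, ?_, ?_, a3, ?_, ?_, ?_, ?_⟩
      · rw [a1]; simp
      · rw [a2]; simp
      · exact List.nodup_cons.mpr ⟨hnadd, a4⟩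
      · intro m hm
        rcases List.mem_cons.mp hm with h | h
        · subst h; exact ⟨hinbn, List.mem_cons_self .., hmem⟩
        · obtain ⟨i1, i2, i3⟩ := a5 m h
          exact ⟨i1, List.mem_cons_of_mem _ i2,
            fun hv => i3 (List.mem_append_left _ hv)⟩
      · intro c hc
        rw [a6 c hc]
        have hlab : lab (set2 dist n.1 n.2 (cur + 1)) c =
            if c = n then cur + 1 else lab dist c := lab_set2 hsh hinbn hc (cur + 1)
        by_cases h1 : c ∈ added
        · rw [if_pos h1, if_pos (List.mem_cons_of_mem _ h1)]
        · rw [if_neg h1, hlab]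
          by_cases h2 : c = n
          · rw [if_pos h2, if_pos (by simp [h2])]
          · rw [if_neg h2, if_neg (by simp [h1, h2])]
      · intro m hm
        rcases List.mem_cons.mp hm with h | h
        · subst h
          exact List.mem_append_right _ (List.mem_cons_self ..)
        · have := a7 m h
          rcases List.mem_append.mp this with hv | ha
          · rcases List.mem_append.mp hv with hv' | hn'
            · exact List.mem_append_left _ hv'
            · rw [List.mem_singleton] at hn'; subst hn'
              exact List.mem_append_right _ (List.mem_cons_self ..)
          · exact List.mem_append_right _ (List.mem_cons_of_mem _ ha)


lemma inv_step {S : List (Int × Int)} {R C : Int} {dist : List (List Int)}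
    {a b : Int} {rest vis : List (Int × Int)}
    (inv : BfsInv S R C dist ((a, b) :: rest) vis) :
    BfsInv S R C
      ((neighbours a b R C).foldl (bfsStep (get2 dist a b)) (dist, rest, vis)).1
      ((neighbours a b R C).foldl (bfsStep (get2 dist a b)) (dist, rest, vis)).2.1
      ((neighbours a b R C).foldl (bfsStep (get2 dist a b)) (dist, rest, vis)).2.2 ∧
    ∃ k, ((neighbours a b R C).foldl (bfsStep (get2 dist a b)) (dist, rest, vis)).2.2.length
            = vis.length + k ∧
         ((neighbours a b R C).foldl (bfsStep (get2 dist a b)) (dist, rest, vis)).2.1.length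
            = rest.length + k := by
  have hqv : (a, b) ∈ vis := inv.qSub (List.mem_cons_self ..)
  have hinbh : inb R C (a, b) := inv.visInb _ hqv
  obtain ⟨hb1, hb2, hb3, hb4⟩ := hinbh
  have hcur : lab dist (a, b) = get2 dist a b := rfl
  have hcur0 : 0 ≤ get2 dist a b := by rw [← hcur]; exact (inv.sound _ hqv).1
  obtain ⟨sh, hshS, hshle⟩ := (inv.sound _ hqv).2
  rw [hcur] at hshle
  have hns : ∀ n ∈ neighbours a b R C, inb R C n := fun n hn =>
    ((mem_neighbours hb1 hb2 hb3 hb4 n).mp hn).1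
  obtain ⟨added, a1, a2, a3, a4, a5, a6, a7⟩ :=
    bfsFold_spec (get2 dist a b) (neighbours a b R C) hns dist rest vis inv.shape inv.visInb
  rw [a1, a2]
  have hrestvis : ∀ x ∈ rest, x ∈ vis := fun x hx => inv.qSub (List.mem_cons_of_mem _ hx)
  have hlab_keep : ∀ c ∈ vis,
      lab ((neighbours a b R C).foldl (bfsStep (get2 dist a b)) (dist, rest, vis)).1 c
        = lab dist c := by
    intro c hc
    rw [a6 c (inv.visInb c hc), if_neg (fun h => (a5 c h).2.2 hc)]
  have hlab_new : ∀ c ∈ added,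
      lab ((neighbours a b R C).foldl (bfsStep (get2 dist a b)) (dist, rest, vis)).1 c
        = get2 dist a b + 1 := by
    intro c hc
    rw [a6 c (a5 c hc).1, if_pos hc]
  have hman_add : ∀ c ∈ added, man c (a, b) = 1 := fun c hc =>
    ((mem_neighbours hb1 hb2 hb3 hb4 c).mp (a5 c hc).2.1).2
  refine ⟨?_, added.length, by simp, by simp⟩
  refine
    { shape := a3
      visInb := ?_, visNodup := ?_, visIff := ?_, sound := ?_, src0 := ?_
      qSub := ?_, qNodup := ?_, qMono := ?_, qBound := ?_, popped := ?_ }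
  · intro c hc
    rcases List.mem_append.mp hc with h | h
    · exact inv.visInb c h
    · exact (a5 c h).1
  · exact List.nodup_append.mpr ⟨inv.visNodup, a4,
      fun x hx y hy hxy => (a5 y hy).2.2 (hxy ▸ hx)⟩
  · intro c hc
    rw [a6 c hc]
    by_cases h1 : c ∈ added
    · rw [if_pos h1]
      exact ⟨fun _ => by omega, fun _ => List.mem_append_right _ h1⟩
    · rw [if_neg h1]
      simp only [List.mem_append, h1, or_false]
      exact inv.visIff c hc
  · intro c hc
    rcases List.mem_append.mp hc with hv | ha
    · rw [hlab_keep c hv]; exact inv.sound c hv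
    · rw [hlab_new c ha]
      refine ⟨by omega, sh, hshS, ?_⟩
      have ht := man_triangle sh (a, b) c
      have hm : man (a, b) c = 1 := by rw [man_comm]; exact hman_add c ha
      omega
  · intro s hs
    refine ⟨List.mem_append_left _ (inv.src0 s hs).1, ?_⟩
    rw [hlab_keep s (inv.src0 s hs).1]
    exact (inv.src0 s hs).2
  · intro x hx
    rcases List.mem_append.mp hx with h | h
    · exact List.mem_append_left _ (hrestvis x h)
    · exact List.mem_append_right _ h
  · refine List.nodup_append.mpr ⟨(List.nodup_cons.mp inv.qNodup).2, a4, ?_⟩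
    intro x hx y hy hxy
    exact (a5 y hy).2.2 (hxy ▸ hrestvis x hx)
  · rw [List.pairwise_append]
    refine ⟨?_, ?_, ?_⟩
    · refine List.Pairwise.imp_of_mem ?_ (List.pairwise_cons.mp inv.qMono).2
      intro x y hx hy hr
      rw [hlab_keep x (hrestvis x hx), hlab_keep y (hrestvis y hy)]
      exact hr
    · refine List.pairwise_of_forall_mem_list ?_
      intro x hx y hy
      rw [hlab_new x hx, hlab_new y hy]
    · intro x hx y hy
      rw [hlab_keep x (hrestvis x hx), hlab_new y hy]
      have := inv.qBound (a, b) rest rfl x (List.mem_cons_of_mem _ hx)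
      rw [hcur] at this
      omega
  · intro hd t heq x hx
    cases rest with
    | nil =>
      have hadd : added = hd :: t := by simpa using heq
      have hhd : hd ∈ added := by rw [hadd]; exact List.mem_cons_self ..
      rw [hlab_new hd hhd]
      rcases List.mem_append.mp hx with h | h
      · simp at h
      · rw [hlab_new x h]; omega
    | cons r0 t' =>
      have hhd : hd = r0 := by
        rw [List.cons_append] at heq
        exact (List.cons.injEq .. |>.mp heq).1.symm
      subst hhd
      have hr0vis : hd ∈ vis := hrestvis hd (List.mem_cons_self ..)
      have hr0 : get2 dist a b ≤ lab dist hd := by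
        rw [← hcur]
        exact (List.pairwise_cons.mp inv.qMono).1 hd (List.mem_cons_self ..)
      rw [hlab_keep hd hr0vis]
      rcases List.mem_append.mp hx with h | h
      · rw [hlab_keep x (hrestvis x h)]
        have := inv.qBound (a, b) (hd :: t') rfl x (List.mem_cons_of_mem _ h)
        rw [hcur] at this
        omega
      · rw [hlab_new x h]; omega
  · intro u hu hnq
    rcases List.mem_append.mp hu with huv | hua
    swap
    · exact absurd (List.mem_append_right _ hua) hnq
    by_cases hq : u ∈ (a, b) :: rest
    · have hu_eq : u = (a, b) := by
        rcases List.mem_cons.mp hq with h | h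
        · exact h
        · exact absurd (List.mem_append_left _ h) hnq
      subst hu_eq
      rw [hlab_keep _ huv, hcur]
      refine ⟨?_, ?_⟩
      · intro v hvinb hmanv
        have hv_ns : v ∈ neighbours a b R C :=
          (mem_neighbours hb1 hb2 hb3 hb4 v).mpr ⟨hvinb, by rw [man_comm]; exact hmanv⟩
        have hvV := a7 v hv_ns
        refine ⟨hvV, ?_⟩
        rcases List.mem_append.mp hvV with hvv | hva
        · rw [hlab_keep v hvv]
          by_cases hvq : v ∈ (a, b) :: rest
          · rcases List.mem_cons.mp hvq with h | h
            · rw [h, hcur]; omega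
            · have := inv.qBound (a, b) rest rfl v (List.mem_cons_of_mem _ h)
              rw [hcur] at this
              omega
          · have := (inv.popped v hvv hvq).2 (a, b) (List.mem_cons_self ..)
            rw [hcur] at this
            omega
        · rw [hlab_new v hva]
      · intro x hx
        rcases List.mem_append.mp hx with hxr | hxa
        · rw [hlab_keep x (hrestvis x hxr)]
          have := (List.pairwise_cons.mp inv.qMono).1 x hxr
          rw [hcur] at this
          exact this
        · rw [hlab_new x hxa]; omega
    · obtain ⟨p1, p2⟩ := inv.popped u huv hq
      refine ⟨?_, ?_⟩
      · intro v hvinb hmanv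
        obtain ⟨q1, q2⟩ := p1 v hvinb hmanv
        refine ⟨List.mem_append_left _ q1, ?_⟩
        rw [hlab_keep v q1, hlab_keep u huv]
        exact q2
      · intro x hx
        rw [hlab_keep u huv]
        rcases List.mem_append.mp hx with hxr | hxa
        · rw [hlab_keep x (hrestvis x hxr)]
          exact p2 x (List.mem_cons_of_mem _ hxr)
        · rw [hlab_new x hxa]
          have := p2 (a, b) (List.mem_cons_self ..)
          rw [hcur] at this
          omega


lemma mem_boxL {R C : Int} {c : Int × Int} : c ∈ boxL R C ↔ inb R C c := by
  unfold boxL inb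
  rw [List.mem_flatMap]
  constructor
  · rintro ⟨i, hi, hc⟩
    rw [PySem.List.mem_pyRange_one] at hi
    rw [List.mem_map] at hc
    obtain ⟨j, hj, rfl⟩ := hc
    rw [PySem.List.mem_pyRange_one] at hj
    exact ⟨hi.1, hi.2, hj.1, hj.2⟩
  · rintro ⟨h1, h2, h3, h4⟩
    exact ⟨c.1, PySem.List.mem_pyRange_one.mpr ⟨h1, h2⟩,
      List.mem_map.mpr ⟨c.2, PySem.List.mem_pyRange_one.mpr ⟨h3, h4⟩, by simp⟩⟩

lemma length_boxL (R C : Int) : (boxL R C).length = R.toNat * C.toNat := by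
  unfold boxL
  rw [List.length_flatMap]
  rw [List.map_congr_left (g := fun _ => C.toNat)
    (fun i _ => by rw [List.length_map, PySem.List.length_pyRange_one, Int.sub_zero])]
  rw [List.map_const', List.sum_replicate, smul_eq_mul, PySem.List.length_pyRange_one,
    Int.sub_zero]

lemma vis_le_box {R C : Int} (vis : List (Int × Int)) (hnd : vis.Nodup)
    (hinb : ∀ c ∈ vis, inb R C c) : vis.length ≤ R.toNat * C.toNat := by
  have h := (List.subperm_of_subset hnd
    (fun c hc => mem_boxL.mpr (hinb c hc))).length_le
  rwa [length_boxL] at h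

lemma bfs_run {S : List (Int × Int)} {R C : Int} :
    ∀ (fuel : Nat) (dist : List (List Int)) (queue vis : List (Int × Int)),
      BfsInv S R C dist queue vis →
      (R.toNat * C.toNat - vis.length) + queue.length < fuel →
      ∃ vis', BfsInv S R C (bfsLoop fuel dist queue vis R C) [] vis' := by
  intro fuel
  induction fuel with
  | zero => intro dist queue vis _ h; omega
  | succ f ih =>
    intro dist queue vis inv hPhi
    cases queue with
    | nil => exact ⟨vis, inv⟩
    | cons hd rest =>
      obtain ⟨a, b⟩ := hd
      have hstep : bfsLoop (f + 1) dist ((a, b) :: rest) vis R C =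
          bfsLoop f
            ((neighbours a b R C).foldl (bfsStep (get2 dist a b)) (dist, rest, vis)).1
            ((neighbours a b R C).foldl (bfsStep (get2 dist a b)) (dist, rest, vis)).2.1
            ((neighbours a b R C).foldl (bfsStep (get2 dist a b)) (dist, rest, vis)).2.2
            R C := rfl
      rw [hstep]
      obtain ⟨inv', k, hk1, hk2⟩ := inv_step inv
      apply ih _ _ _ inv'
      have hle := vis_le_box _ inv'.visNodup inv'.visInb
      rw [hk1] at hle
      rw [hk1, hk2]
      simp only [List.length_cons] at hPhi
      omega

lemma reach {S : List (Int × Int)} {R C : Int} {df : List (List Int)}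
    {vis' : List (Int × Int)} (inv : BfsInv S R C df [] vis') :
    ∀ (n : Nat) (s c : Int × Int), s ∈ vis' → inb R C c → man s c = n →
      c ∈ vis' ∧ lab df c ≤ lab df s + n := by
  intro n
  induction n with
  | zero =>
    intro s c hs hc h0
    have hsc : s = c := man_eq_zero (by exact_mod_cast h0)
    subst hsc
    exact ⟨hs, by simp⟩
  | succ k ih =>
    intro s c hs hc hm
    have hsinb : inb R C s := inv.visInb s hs
    obtain ⟨c', hc'inb, hc'man, hc'adj⟩ :
        ∃ c', inb R C c' ∧ man s c' = (k : Int) ∧ man c' c = 1 := by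
      obtain ⟨s1, s2⟩ := s
      obtain ⟨c1, c2⟩ := c
      obtain ⟨i1, i2, i3, i4⟩ := hsinb
      obtain ⟨j1, j2, j3, j4⟩ := hc
      unfold man at hm
      dsimp only at hm i1 i2 i3 i4 j1 j2 j3 j4
      by_cases h1 : s1 < c1
      · exact ⟨(c1 - 1, c2), (by unfold inb; dsimp only; omega),
          (by unfold man; dsimp only; omega), (by unfold man; dsimp only; omega)⟩
      by_cases h2 : c1 < s1
      · exact ⟨(c1 + 1, c2), (by unfold inb; dsimp only; omega),
          (by unfold man; dsimp only; omega), (by unfold man; dsimp only; omega)⟩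
      by_cases h3 : s2 < c2
      · exact ⟨(c1, c2 - 1), (by unfold inb; dsimp only; omega),
          (by unfold man; dsimp only; omega), (by unfold man; dsimp only; omega)⟩
      · exact ⟨(c1, c2 + 1), (by unfold inb; dsimp only; omega),
          (by unfold man; dsimp only; omega), (by unfold man; dsimp only; omega)⟩
    obtain ⟨hvc', hlc'⟩ := ih s c' hs hc'inb hc'man
    obtain ⟨hp1, _⟩ := inv.popped c' hvc' (List.not_mem_nil)
    obtain ⟨hcv, hlc⟩ := hp1 c hc hc'adj
    refine ⟨hcv, ?_⟩
    push_cast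
    omega

lemma final_lab {S : List (Int × Int)} {R C : Int} {df : List (List Int)}
    {vis' : List (Int × Int)} (inv : BfsInv S R C df [] vis')
    (c : Int × Int) (hc : inb R C c) : lab df c = mdist S c := by
  by_cases hS : S = []
  · subst hS
    have hnv : c ∉ vis' := by
      intro h
      obtain ⟨_, s, hs, _⟩ := inv.sound c h
      simp at hs
    have hlab : lab df c = -1 := by
      by_contra h
      exact hnv ((inv.visIff c hc).mpr h)
    rw [hlab]
    rfl
  · obtain ⟨m0, mub, sw, hswS, hsweq⟩ := mdist_spec S c hS
    have hreach : ∀ s ∈ S, c ∈ vis' ∧ lab df c ≤ man s c := by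
      intro s hsS
      have hsv := (inv.src0 s hsS).1
      have h := reach inv (man s c).toNat s c hsv hc
        (by rw [Int.toNat_of_nonneg (man_nonneg s c)])
      refine ⟨h.1, ?_⟩
      have h2 := h.2
      rw [(inv.src0 s hsS).2, Int.toNat_of_nonneg (man_nonneg s c)] at h2
      omega
    obtain ⟨hcv, hub⟩ := hreach sw hswS
    obtain ⟨hl0, s2, hs2S, hs2le⟩ := inv.sound c hcv
    have h1 : lab df c ≤ mdist S c := by
      rw [hsweq, man_comm]
      exact hub
    have h2 : mdist S c ≤ lab df c := by
      have hm := mub s2 hs2S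
      rw [man_comm] at hm
      omega
    omega

lemma alt_eq (grid : List (List Int)) (R C : Int) :
    grid_to_distances_alt grid R C =
      (PySem.List.pyRange 0 R 1).map (fun i =>
        (PySem.List.pyRange 0 C 1).map (fun j => mdist (srcs grid) (i, j))) := rfl

theorem grid_to_distances_spec : Claim_equal_grid_to_distances := by
  intro grid R C _ hpre
  unfold Spec_grid_to_distances
  have hsrc_inb : ∀ c ∈ srcsFrom grid 0, inb R C c := by
    intro c hcm
    obtain ⟨k, hk, j, hj, hne, rfl⟩ := mem_srcsFrom.mp hcm
    have hp := hpre ((0 : Int) + k, grid[k])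
      (PySem.List.mem_enumerate_iff _ _ _ |>.mpr ⟨k, hk, rfl⟩)
      ((0 : Int) + j, grid[k][j])
      (PySem.List.mem_enumerate_iff _ _ _ |>.mpr ⟨j, hj, rfl⟩) hne
    unfold inb
    dsimp only at hp ⊢
    omega
  obtain ⟨sh1, snodes, slab⟩ := scan_fold_spec grid 0
    ((PySem.List.pyRange 0 R 1).map (fun _ => (PySem.List.pyRange 0 C 1).map (fun _ => (-1 : Int))))
    [] (shape_dist0 R C) hsrc_inb
  rw [List.nil_append] at snodes
  have hnodup := nodup_srcsFrom grid 0
  have hA : grid_to_distances grid R C =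
      bfsLoop (R.toNat * C.toNat + 1)
        (grid.foldl scanRow
          (((PySem.List.pyRange 0 R 1).map
              (fun _ => (PySem.List.pyRange 0 C 1).map (fun _ => (-1 : Int))), []), 0)).1.1
        (grid.foldl scanRow
          (((PySem.List.pyRange 0 R 1).map
              (fun _ => (PySem.List.pyRange 0 C 1).map (fun _ => (-1 : Int))), []), 0)).1.2
        (PySem.Set.ofList (grid.foldl scanRow
          (((PySem.List.pyRange 0 R 1).map
              (fun _ => (PySem.List.pyRange 0 C 1).map (fun _ => (-1 : Int))), []), 0)).1.2)
        R C := rfl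
  rw [hA, snodes, PySem.Set.ofList_eq_self_of_nodup _ hnodup]
  have hlab0 : ∀ c, inb R C c →
      lab (grid.foldl scanRow
        (((PySem.List.pyRange 0 R 1).map
            (fun _ => (PySem.List.pyRange 0 C 1).map (fun _ => (-1 : Int))), []), 0)).1.1 c =
        if c ∈ srcsFrom grid 0 then 0 else -1 := by
    intro c hc
    rw [slab c hc, lab_dist0]
  have inv0 : BfsInv (srcsFrom grid 0) R C
      (grid.foldl scanRow
        (((PySem.List.pyRange 0 R 1).map
            (fun _ => (PySem.List.pyRange 0 C 1).map (fun _ => (-1 : Int))), []), 0)).1.1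
      (srcsFrom grid 0) (srcsFrom grid 0) := by
    refine
      { shape := sh1
        visInb := hsrc_inb, visNodup := hnodup, visIff := ?_, sound := ?_, src0 := ?_
        qSub := fun x h => h, qNodup := hnodup, qMono := ?_, qBound := ?_
        popped := fun u hu hnq => absurd hu hnq }
    · intro c hc
      rw [hlab0 c hc]
      by_cases h : c ∈ srcsFrom grid 0
      · rw [if_pos h]
        exact ⟨fun _ => by omega, fun _ => h⟩
      · rw [if_neg h]
        exact ⟨fun hx => absurd hx h, fun hx => absurd rfl hx⟩
    · intro c hcS
      rw [hlab0 c (hsrc_inb c hcS), if_pos hcS]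
      exact ⟨le_refl 0, c, hcS, by rw [man_self]⟩
    · intro s hs
      exact ⟨hs, by rw [hlab0 s (hsrc_inb s hs), if_pos hs]⟩
    · refine List.pairwise_of_forall_mem_list ?_
      intro x hx y hy
      rw [hlab0 x (hsrc_inb x hx), if_pos hx, hlab0 y (hsrc_inb y hy), if_pos hy]
    · intro hd t heq x hx
      have hhd : hd ∈ srcsFrom grid 0 := by rw [heq]; exact List.mem_cons_self ..
      rw [hlab0 x (hsrc_inb x hx), if_pos hx, hlab0 hd (hsrc_inb hd hhd), if_pos hhd]
      omega
  obtain ⟨vis', invF⟩ := bfs_run (R.toNat * C.toNat + 1) _ _ _ inv0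
    (by have := vis_le_box _ hnodup hsrc_inb; omega)
  rw [alt_eq, srcs_eq]
  apply List.ext_getElem
  · rw [invF.shape.1, List.length_map, PySem.List.length_pyRange_one, Int.sub_zero]
  · intro k hk1 hk2
    have hkR : k < R.toNat := by rw [← invF.shape.1]; exact hk1
    apply List.ext_getElem
    · rw [invF.shape.2 _ (List.getElem_mem _), List.getElem_map, List.length_map,
        PySem.List.length_pyRange_one, Int.sub_zero]
    · intro l hl1 hl2
      have hlC : l < C.toNat := by
        rw [← invF.shape.2 _ (List.getElem_mem _)]; exact hl1
      have hcinb : inb R C ((k : Int), (l : Int)) := by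
        unfold inb; dsimp only; omega
      have hlhs : lab (bfsLoop (R.toNat * C.toNat + 1)
          (grid.foldl scanRow
            (((PySem.List.pyRange 0 R 1).map
                (fun _ => (PySem.List.pyRange 0 C 1).map (fun _ => (-1 : Int))), []), 0)).1.1
          (srcsFrom grid 0) (srcsFrom grid 0) R C) ((k : Int), (l : Int)) =
          (bfsLoop (R.toNat * C.toNat + 1)
          (grid.foldl scanRow
            (((PySem.List.pyRange 0 R 1).map
                (fun _ => (PySem.List.pyRange 0 C 1).map (fun _ => (-1 : Int))), []), 0)).1.1
          (srcsFrom grid 0) (srcsFrom grid 0) R C)[k][l] := by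
        unfold lab get2
        dsimp only
        rw [Int.toNat_natCast, Int.toNat_natCast,
          List.getD_eq_getElem _ [] hk1, List.getD_eq_getElem _ (-1) hl1]
      refine hlhs.symm.trans ?_
      rw [final_lab invF _ hcinb]
      simp only [List.getElem_map, PySem.List.getElem_pyRange_one]
      norm_num
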